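-- pv_equiv track=rewrite | github.com/pjestin/aoc | 2017/day09/day09.py | find_group_score
-- ===== SOURCE A (Python) =====
-- def find_group_score(line: str) -> int:
--     should_ignore_next = False
--     is_garbage = False
--     group_score = 0
--     total_score = 0
--     for char in line:
--         if should_ignore_next:
--             should_ignore_next = False
--             continue
--
--         if char == "!":
--             should_ignore_next = True
--             continue
--
--         if char == "<":
--             is_garbage = True
--         elif char == ">":
--             is_garbage = False
--
--         if is_garbage:
--             continue
--
--         if char == "{":
--             group_score += 1
--         elif char == "}":
--             total_score += group_score
--             group_score -= 1
--
--     return total_score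
-- ===== SOURCE B (Python) =====
-- def _strip_cancellations(line):
--     out = []
--     it = iter(line)
--     for c in it:
--         if c == '!':
--             next(it, None)  # drop the cancelled character, if any
--         else:
--             out.append(c)
--     return ''.join(out)
--
--
-- def _strip_garbage(s):
--     out = []
--     garbage = False
--     for c in s:
--         if garbage:
--             if c == '>':
--                 garbage = False
--         elif c == '<':
--             garbage = True
--         else:
--             out.append(c)
--     return ''.join(out)
--
--
-- def find_group_score(line: str) -> int:
--     cleaned = _strip_garbage(_strip_cancellations(line))
--     total = 0
--     depth = 0
--     for c in cleaned:
--         if c == '{':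
--             depth += 1
--         elif c == '}':
--             total += depth
--             depth -= 1
--     return total
-- ===== Notes on version B (the rewrite author's own statement) =====
-- stated objective: simpler
-- what changed: Replaced A's fused four-variable single-pass state machine by three tiny passes: strip '!'-cancellations, strip garbage spans, then count brace depth.
import Mathlib
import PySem

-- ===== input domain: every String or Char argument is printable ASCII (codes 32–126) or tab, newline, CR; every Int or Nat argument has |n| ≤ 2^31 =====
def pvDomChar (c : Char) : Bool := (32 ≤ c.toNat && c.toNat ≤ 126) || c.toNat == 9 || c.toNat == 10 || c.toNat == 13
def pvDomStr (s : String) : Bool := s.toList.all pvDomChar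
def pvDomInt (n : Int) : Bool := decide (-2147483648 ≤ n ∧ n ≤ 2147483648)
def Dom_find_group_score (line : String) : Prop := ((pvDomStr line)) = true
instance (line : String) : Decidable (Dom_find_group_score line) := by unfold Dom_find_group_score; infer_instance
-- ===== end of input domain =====

-- B replaces A's fused four-variable single-pass state machine by three simple passes
-- (strip '!'-cancellations, strip garbage spans, count brace depth); objective: simpler.

-- ===== PORT A =====
-- A's loop body: state = (should_ignore_next, is_garbage, group_score, total_score)
def pvStepA (st : Bool × Bool × Int × Int) (c : Char) : Bool × Bool × Int × Int :=
  let (ign, gar, gs, ts) := st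
  if ign then (false, gar, gs, ts)
  else if c = '!' then (true, gar, gs, ts)
  else
    let gar' := if c = '<' then true else if c = '>' then false else gar
    if gar' then (false, gar', gs, ts)
    else if c = '{' then (false, gar', gs + 1, ts)
    else if c = '}' then (false, gar', gs - 1, ts + gs)
    else (false, gar', gs, ts)

def find_group_score (line : String) : Int :=
  (line.toList.foldl pvStepA (false, false, 0, 0)).2.2.2

-- ===== PORT B =====
-- pass 1: remove every '!' together with the character after it
def pvStripCancel : List Char → List Char
  | [] => []
  | ['!'] => []
  | '!' :: _ :: r => pvStripCancel r
  | c :: rest => c :: pvStripCancel rest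

-- pass 2: remove garbage spans '<'…'>' (an unterminated '<' removes the rest)
def pvStripGarbage (garbage : Bool) : List Char → List Char
  | [] => []
  | c :: rest =>
    if garbage then
      (if c = '>' then pvStripGarbage false rest else pvStripGarbage true rest)
    else if c = '<' then pvStripGarbage true rest
    else c :: pvStripGarbage false rest

-- pass 3: count brace depth
def pvCount (depth total : Int) : List Char → Int
  | [] => total
  | c :: rest =>
    if c = '{' then pvCount (depth + 1) total rest
    else if c = '}' then pvCount (depth - 1) (total + depth) rest
    else pvCount depth total rest

def find_group_score_alt (line : String) : Int :=
  pvCount 0 0 (pvStripGarbage false (pvStripCancel line.toList))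

-- ===== PRECONDITION & SPEC =====
def Spec_find_group_score (line : String) (out : Int) : Prop := out = find_group_score_alt line
instance (line : String) (out : Int) : Decidable (Spec_find_group_score line out) := by unfold Spec_find_group_score; infer_instance

-- ===== CLAIM (what is proved, stated in full; the proofs are below) =====
def Claim_equal_find_group_score : Prop := ∀ (line : String), Dom_find_group_score line → Spec_find_group_score line (find_group_score line)

-- ===== LEMMAS AND PROOFS =====
theorem pvMain (l : List Char) : ∀ (gar : Bool) (gs ts : Int),
    (List.foldl pvStepA (false, gar, gs, ts) l).2.2.2
      = pvCount gs ts (pvStripGarbage gar (pvStripCancel l)) := by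
  induction l using pvStripCancel.induct with
  | case1 => intro gar gs ts; simp [pvStripCancel, pvStripGarbage, pvCount]
  | case2 => intro gar gs ts; simp [pvStepA, pvStripCancel, pvStripGarbage, pvCount]
  | case3 c r ih =>
      intro gar gs ts
      simpa [pvStepA, pvStripCancel] using ih gar gs ts
  | case4 c rest h1 h2 ih =>
      intro gar gs ts
      have hc : c ≠ '!' := by
        intro h; subst h
        cases rest with
        | nil => exact h1 rfl rfl
        | cons d r => exact h2 d r rfl rfl
      simp only [List.foldl, pvStepA, pvStripCancel, hc]
      by_cases hlt : c = '<'
      · subst hlt; simp [pvStripGarbage, ih]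
      · by_cases hgt : c = '>'
        · subst hgt
          cases gar <;> simp [pvStripGarbage, pvCount, ih]
        · cases gar with
          | true => simp [pvStripGarbage, hlt, hgt, ih]
          | false =>
            by_cases hob : c = '{'
            · subst hob; simp [pvStripGarbage, pvCount, ih]
            · by_cases hcb : c = '}'
              · subst hcb; simp [pvStripGarbage, pvCount, ih]
              · simp [pvStripGarbage, pvCount, hlt, hgt, hob, hcb, ih]

-- ===== VERDICT (by name: the statement is the Claim_ definition above) =====
theorem find_group_score_spec : Claim_equal_find_group_score := by
  intro line _
  unfold Spec_find_group_score find_group_score find_group_score_alt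
  exact pvMain line.toList false 0 0
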